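-- pv_equiv track=rewrite | github.com/tamilore3000/Python-Tutorial | EZE_CLASS/practical_class/q5_partitioning_list.py | SieveNow
-- ===== SOURCE A (Python) =====
-- import math
--
-- def SieveNow(T):
--     A = []
--     B = []
--     C = []
--     for num in T:
--         if num % 2 == 1:
--             A.append(num)
--         elif num % 2 == 0:
--             B.append(num)
--         if math.sqrt(num).is_integer():
--             C.append(num)
--     return A, B, C
-- ===== SOURCE B (Python) =====
-- import math
--
-- def SieveNow(T):
--     # Divide-and-conquer: split the list in halves, partition each half
--     # recursively, concatenate the three partitions on the way back up.
--     if not T: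
--         return [], [], []
--     if len(T) == 1:
--         n = T[0]
--         if n % 2 == 1:
--             odds, evens = [n], []
--         else:
--             odds, evens = [], [n]
--         squares = [n] if math.isqrt(n) ** 2 == n else []
--         return odds, evens, squares
--     mid = len(T) // 2
--     A1, B1, C1 = SieveNow(T[:mid])
--     A2, B2, C2 = SieveNow(T[mid:])
--     return A1 + A2, B1 + B2, C1 + C2
-- ===== Notes on version B (the rewrite author's own statement) =====
-- stated objective: alternative
-- what changed: Replaces the single linear loop with three growing accumulators by a divide-and-conquer recursion: the list is split in halves, each half is partitioned recursively, and the three result lists are concatenated on the way back up; the perfect-square test uses exact integer math.isqrt instead of float math.sqrt.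
import Mathlib
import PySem

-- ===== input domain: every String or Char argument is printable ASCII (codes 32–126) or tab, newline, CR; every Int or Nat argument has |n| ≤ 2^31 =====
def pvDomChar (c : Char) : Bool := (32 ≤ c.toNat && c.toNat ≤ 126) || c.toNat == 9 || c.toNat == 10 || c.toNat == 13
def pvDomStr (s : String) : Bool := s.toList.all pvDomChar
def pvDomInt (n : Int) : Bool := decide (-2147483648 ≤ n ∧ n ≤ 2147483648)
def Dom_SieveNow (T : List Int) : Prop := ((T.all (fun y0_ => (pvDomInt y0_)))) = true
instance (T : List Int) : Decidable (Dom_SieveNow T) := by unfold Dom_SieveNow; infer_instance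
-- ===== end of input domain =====

-- B replaces A's single linear loop with three accumulators by a divide-and-conquer recursion
-- (split in halves, partition each half, concatenate); equal return values proved for
-- non-negative inputs (both Pythons raise ValueError on negative elements).

-- ===== PORT A =====
-- math.sqrt(num).is_integer(): exact on Dom (0 ≤ num ≤ 2^31 < 2^52, where the correctly
-- rounded double sqrt is an integer iff num is a perfect square); ported via Nat.sqrt.
def pySqrtIsInteger (num : Int) : Bool := Nat.sqrt num.toNat * Nat.sqrt num.toNat == num.toNat

def SieveNow (T : List Int) : List Int × List Int × List Int :=
  T.foldl (fun s num =>
    let s1 :=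
      if PySem.Int.mod num 2 = 1 then (s.1 ++ [num], s.2.1, s.2.2)
      else if PySem.Int.mod num 2 = 0 then (s.1, s.2.1 ++ [num], s.2.2)
      else s
    if pySqrtIsInteger num then (s1.1, s1.2.1, s1.2.2 ++ [num]) else s1)
    ([], [], [])

-- ===== PORT B =====
-- math.isqrt(n)**2 == n ported as Nat.sqrt (exact for n ≥ 0); T[0] is always in range in the
-- len==1 branch, ported as headD; slices T[:mid], T[mid:] with 0 ≤ mid ≤ len are take/drop.
def SieveNow_alt (T : List Int) : List Int × List Int × List Int :=
  if T.length = 0 then ([], [], [])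
  else if T.length = 1 then
    let n := T.headD 0
    let ob : List Int × List Int :=
      if PySem.Int.mod n 2 = 1 then ([n], []) else ([], [n])
    let squares : List Int := if (Nat.sqrt n.toNat : Int) ^ 2 == n then [n] else []
    (ob.1, ob.2, squares)
  else
    let mid := T.length / 2
    let l := SieveNow_alt (T.take mid)
    let r := SieveNow_alt (T.drop mid)
    (l.1 ++ r.1, l.2.1 ++ r.2.1, l.2.2 ++ r.2.2)
termination_by T.length
decreasing_by
  · simp [List.length_take]; omega
  · simp [List.length_drop]; omega

-- ===== PRECONDITION & SPEC =====
-- Pre_ excludes lists with a negative element: there math.sqrt (in A) and math.isqrt (in B) raise ValueError.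
def Pre_SieveNow (T : List Int) : Prop := ∀ n ∈ T, 0 ≤ n
instance (T : List Int) : Decidable (Pre_SieveNow T) := by unfold Pre_SieveNow; infer_instance
def pvWitness_SieveNow : List Int := [0, 1, 2, 3, 4, 9, 10]

def Spec_SieveNow (T : List Int) (out : List Int × List Int × List Int) : Prop := out = SieveNow_alt T
instance (T : List Int) (out : List Int × List Int × List Int) : Decidable (Spec_SieveNow T out) := by unfold Spec_SieveNow; infer_instance

-- ===== CLAIM (what is proved, stated in full; the proofs are below) =====
def Claim_equal_SieveNow : Prop := ∀ (T : List Int), Dom_SieveNow T → Pre_SieveNow T → Spec_SieveNow T (SieveNow T)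

-- ===== LEMMAS AND PROOFS =====

-- The two perfect-square predicates agree on non-negative n.
theorem sq_pred_eq (n : Int) (hn : 0 ≤ n) :
    pySqrtIsInteger n = ((Nat.sqrt n.toNat : Int) ^ 2 == n) := by
  unfold pySqrtIsInteger
  rcases Int.eq_ofNat_of_zero_le hn with ⟨m, rfl⟩
  simp [pow_two]
  omega

-- A's fold, with general initial accumulators, appends the three filters.
theorem foldl_step (T : List Int) (a b c : List Int) (h : ∀ n ∈ T, 0 ≤ n) :
    T.foldl (fun s num =>
      let s1 :=
        if PySem.Int.mod num 2 = 1 then (s.1 ++ [num], s.2.1, s.2.2)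
        else if PySem.Int.mod num 2 = 0 then (s.1, s.2.1 ++ [num], s.2.2)
        else s
      if pySqrtIsInteger num then (s1.1, s1.2.1, s1.2.2 ++ [num]) else s1)
      (a, b, c)
    = (a ++ T.filter (fun n => PySem.Int.mod n 2 == 1),
       b ++ T.filter (fun n => PySem.Int.mod n 2 == 0),
       c ++ T.filter (fun n => (Nat.sqrt n.toNat : Int) ^ 2 == n)) := by
  induction T generalizing a b c with
  | nil => simp
  | cons x xs ih =>
    have hx : (0:Int) ≤ x := h x (by simp)
    have hxs : ∀ n ∈ xs, (0:Int) ≤ n := fun n hn => h n (by simp [hn])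
    have hm' : PySem.Int.mod x 2 = x % 2 := PySem.Int.mod_eq_emod_of_pos (by norm_num)
    have hmod : x % 2 = 0 ∨ x % 2 = 1 := by omega
    have hsq := sq_pred_eq x hx
    simp only [List.foldl_cons, List.filter_cons]
    rcases hmod with hm | hm
    · by_cases hs : pySqrtIsInteger x = true
      · have ih' := ih a (b ++ [x]) (c ++ [x]) hxs
        simp [hm', hm, hs, ← hsq]
        simp at ih'
        simpa [hm'] using ih'
      · have ih' := ih a (b ++ [x]) c hxs
        simp [hm', hm, hs, ← hsq]
        simp at ih'
        simpa [hm'] using ih'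
    · by_cases hs : pySqrtIsInteger x = true
      · have ih' := ih (a ++ [x]) b (c ++ [x]) hxs
        simp [hm', hm, hs, ← hsq]
        simp at ih'
        simpa [hm'] using ih'
      · have ih' := ih (a ++ [x]) b c hxs
        simp [hm', hm, hs, ← hsq]
        simp at ih'
        simpa [hm'] using ih'

-- B's divide-and-conquer computes the three filters (for any input).
theorem alt_eq (T : List Int) :
    SieveNow_alt T
    = (T.filter (fun n => PySem.Int.mod n 2 == 1),
       T.filter (fun n => PySem.Int.mod n 2 == 0),
       T.filter (fun n => (Nat.sqrt n.toNat : Int) ^ 2 == n)) := by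
  induction hn : T.length using Nat.strong_induction_on generalizing T with
  | _ k ih =>
    rw [SieveNow_alt]
    by_cases h0 : T.length = 0
    · have : T = [] := List.length_eq_zero_iff.mp h0
      simp [this]
    · by_cases h1 : T.length = 1
      · rcases List.length_eq_one_iff.mp h1 with ⟨n, rfl⟩
        have hm' : PySem.Int.mod n 2 = n % 2 := PySem.Int.mod_eq_emod_of_pos (by norm_num)
        have hmod : n % 2 = 0 ∨ n % 2 = 1 := by omega
        rcases hmod with hm | hm <;>
          by_cases hs : ((Nat.sqrt n.toNat : Int) ^ 2 == n) = true <;>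
            simp [h0, h1, hm', hm, hs, List.filter]
      · have hlen : 2 ≤ T.length := by omega
        have hmid1 : 1 ≤ T.length / 2 := by omega
        have hmid2 : T.length / 2 < T.length := by omega
        have htake : (T.take (T.length / 2)).length = T.length / 2 := by
          simp [List.length_take]; omega
        have hdrop : (T.drop (T.length / 2)).length = T.length - T.length / 2 := by
          simp [List.length_drop]
        have ihl := ih (T.take (T.length / 2)).length (by omega) _ rfl
        have ihr := ih (T.drop (T.length / 2)).length (by omega) _ rfl
        simp only [h0, h1, if_false]
        rw [ihl, ihr]
        simp [← List.filter_append, List.take_append_drop]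

-- ===== VERDICT (by name: the statement is the Claim_ definition above) =====
theorem SieveNow_spec : Claim_equal_SieveNow := by
  intro T _ hpre
  unfold Spec_SieveNow SieveNow
  rw [alt_eq]
  simpa using foldl_step T [] [] [] hpre
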